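-- pv_equiv track=rewrite | github.com/78654sri/Data-Structures-and-Algorithms-DSA- | Arrays/Arrays operations/two pointers/squares in sorted array.py | find_v_shape_min
-- ===== SOURCE A (Python) =====
-- def find_v_shape_min(arr):
--     left, right = 0, len(arr) - 1
--
--     while left < right:
--         if arr[left] > arr[right]:
--             # Move left pointer to the right
--             left += 1
--         else:
--             # Move right pointer to the left
--             right -= 1
--
--     # When left == right, that is the minimum point
--     return arr[left]
-- ===== SOURCE B (Python) =====
-- def find_v_shape_min(arr):
--     return sorted(arr)[0]
-- ===== Notes on version B (the rewrite author's own statement) =====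
-- stated objective: simpler
-- what changed: Replaces the two-pointer endpoint-elimination loop (which always discards the larger endpoint and hence returns the array minimum) with a one-line sort-then-take-first; both raise on empty input, excluded by Pre_.
import Mathlib
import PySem

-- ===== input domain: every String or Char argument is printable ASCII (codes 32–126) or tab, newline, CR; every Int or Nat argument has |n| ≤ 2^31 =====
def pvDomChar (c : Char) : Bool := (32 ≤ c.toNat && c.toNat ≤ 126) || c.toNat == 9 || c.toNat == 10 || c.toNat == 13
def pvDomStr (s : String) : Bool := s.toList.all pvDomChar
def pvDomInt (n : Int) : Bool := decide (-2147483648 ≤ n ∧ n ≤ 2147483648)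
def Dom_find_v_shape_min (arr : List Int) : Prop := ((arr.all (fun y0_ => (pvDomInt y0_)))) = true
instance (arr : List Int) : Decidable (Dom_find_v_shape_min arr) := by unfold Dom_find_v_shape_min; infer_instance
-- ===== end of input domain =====

-- B replaces A's two-pointer endpoint-elimination loop (which returns the array minimum)
-- with sorted(arr)[0]; objective: simpler. Both raise on the empty list, excluded by Pre_.

-- ===== PORT A =====
-- fuel-bounded transcription of A's while loop; fuel = arr.length bounds right-left
def pvAloop (arr : List Int) (l r : Int) (fuel : Nat) : Int :=
  match fuel with
  | 0 => PySem.List.pyGetD arr l 0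
  | fuel + 1 =>
    if l < r then
      if PySem.List.pyGetD arr l 0 > PySem.List.pyGetD arr r 0 then
        pvAloop arr (l + 1) r fuel
      else
        pvAloop arr l (r - 1) fuel
    else PySem.List.pyGetD arr l 0

def find_v_shape_min (arr : List Int) : Int :=
  pvAloop arr 0 ((arr.length : Int) - 1) arr.length

-- ===== PORT B =====
def find_v_shape_min_alt (arr : List Int) : Int :=
  PySem.List.pyGetD (PySem.List.sorted arr (fun x => x) false) 0 0

-- ===== PRECONDITION & SPEC =====
-- Excluded: the empty list, on which both A and B raise IndexError.
def Pre_find_v_shape_min (arr : List Int) : Prop := arr ≠ []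
instance (arr : List Int) : Decidable (Pre_find_v_shape_min arr) := by unfold Pre_find_v_shape_min; infer_instance
def pvWitness_find_v_shape_min : List Int := [5, 2, 7]

def Spec_find_v_shape_min (arr : List Int) (out : Int) : Prop := out = find_v_shape_min_alt arr
instance (arr : List Int) (out : Int) : Decidable (Spec_find_v_shape_min arr out) := by unfold Spec_find_v_shape_min; infer_instance

-- ===== CLAIM (what is proved, stated in full; the proofs are below) =====
def Claim_equal_find_v_shape_min : Prop := ∀ (arr : List Int), Dom_find_v_shape_min arr → Pre_find_v_shape_min arr → Spec_find_v_shape_min arr (find_v_shape_min arr)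

-- ===== LEMMAS AND PROOFS =====

-- A's loop returns an element of arr that is ≤ every element in the surviving window [l, r].
lemma pvAloop_spec (arr : List Int) :
    ∀ (fuel : Nat) (l r : Int), 0 ≤ l → l ≤ r → r < (arr.length : Int) →
      (r - l).toNat ≤ fuel →
      pvAloop arr l r fuel ∈ arr ∧
        ∀ (i : Int), l ≤ i → i ≤ r → pvAloop arr l r fuel ≤ PySem.List.pyGetD arr i 0 := by
  intro fuel
  induction fuel with
  | zero =>
    intro l r hl hlr hr hfuel
    have hlr' : l = r := by omega
    subst hlr'
    simp only [pvAloop]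
    have hget : PySem.List.pyGetD arr l 0 = arr[l.toNat]'(by omega) := by
      rw [PySem.List.pyGetD_of_nonneg arr 0 hl, List.getD_eq_getElem _ _ (by omega)]
    constructor
    · rw [hget]; exact List.getElem_mem _
    · intro i hi hi'
      have : i = l := by omega
      subst this; exact le_refl _
  | succ fuel ih =>
    intro l r hl hlr hr hfuel
    by_cases hlt : l < r
    · simp only [pvAloop, if_pos hlt]
      by_cases hcmp : PySem.List.pyGetD arr l 0 > PySem.List.pyGetD arr r 0
      · rw [if_pos hcmp]
        obtain ⟨hmem, hle⟩ := ih (l + 1) r (by omega) (by omega) hr (by omega)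
        refine ⟨hmem, ?_⟩
        intro i hi hi'
        by_cases hil : i = l
        · subst hil
          exact le_of_lt (lt_of_le_of_lt (hle r (by omega) (le_refl r)) hcmp)
        · exact hle i (by omega) hi'
      · rw [if_neg hcmp]
        obtain ⟨hmem, hle⟩ := ih l (r - 1) hl (by omega) (by omega) (by omega)
        refine ⟨hmem, ?_⟩
        intro i hi hi'
        by_cases hir : i = r
        · subst hir
          exact le_trans (hle l (le_refl l) (by omega)) (by omega)
        · exact hle i hi (by omega)
    · have hlr' : l = r := by omega
      subst hlr'
      simp only [pvAloop, if_neg hlt]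
      have hget : PySem.List.pyGetD arr l 0 = arr[l.toNat]'(by omega) := by
        rw [PySem.List.pyGetD_of_nonneg arr 0 hl, List.getD_eq_getElem _ _ (by omega)]
      constructor
      · rw [hget]; exact List.getElem_mem _
      · intro i hi hi'
        have : i = l := by omega
        subst this; exact le_refl _

-- ===== VERDICT (by name: the statement is the Claim_ definition above) =====
theorem find_v_shape_min_spec : Claim_equal_find_v_shape_min := by
  intro arr _ hpre
  unfold Spec_find_v_shape_min find_v_shape_min find_v_shape_min_alt
  have hlen : 0 < arr.length := List.length_pos_iff.mpr hpre
  obtain ⟨hmem, hle⟩ := pvAloop_spec arr arr.length 0 ((arr.length : Int) - 1)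
    (le_refl 0) (by omega) (by omega) (by omega)
  -- the sorted list is nonempty; name its head
  have hs : PySem.List.sorted arr (fun x => x) false ≠ [] := by
    intro h
    exact hpre ((PySem.List.sorted_eq_nil_iff arr (fun x => x) false).mp h)
  obtain ⟨m, t, hmt⟩ := List.exists_cons_of_ne_nil hs
  have hB : PySem.List.pyGetD (PySem.List.sorted arr (fun x => x) false) 0 0 = m := by
    rw [hmt]; simp [PySem.List.pyGetD, PySem.List.pyGet?, PySem.List.pyIdx?]
  rw [hB]
  have hmmem : m ∈ arr := by
    have : m ∈ PySem.List.sorted arr (fun x => x) false := by rw [hmt]; exact List.mem_cons_self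
    exact (PySem.List.mem_sorted arr (fun x => x) false m).mp this
  -- m ≤ A's result (m is ≤ every element of arr, A's result is an element)
  have h1 : m ≤ pvAloop arr 0 ((arr.length : Int) - 1) arr.length :=
    PySem.List.key_head_sorted_le arr (fun x => x) hmt _ hmem
  -- A's result ≤ m (A's result is ≤ every element indexed in [0, len-1]; m sits at some index)
  obtain ⟨k, hk, hkm⟩ := List.getElem_of_mem hmmem
  have h2 : pvAloop arr 0 ((arr.length : Int) - 1) arr.length ≤ m := by
    have := hle (k : Int) (by omega) (by omega)
    rwa [PySem.List.pyGetD_natCast, List.getD_eq_getElem _ _ hk, hkm] at this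
  omega
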